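-- pv_equiv track=rewrite | github.com/danielmuellerdev/HASHET | tweet_processor.py | _convert_tokens_to_tweet_text
-- ===== SOURCE A (Python) =====
-- from typing import List
--
-- def _convert_tokens_to_tweet_text(tokens: List[str]) -> str:
--     is_hashtag = False
--     tweet_text = ''
--     for token in tokens:
--         if token == '#':
--             is_hashtag = True
--         elif is_hashtag:
--             tweet_text += ' #' + token
--             is_hashtag = False
--         else:
--             tweet_text += ' ' + token
--
--     return tweet_text.strip()
-- ===== SOURCE B (Python) =====
-- from typing import List
--
-- def _convert_tokens_to_tweet_text(tokens: List[str]) -> str: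
--     parts = []
--     i = 0
--     n = len(tokens)
--     while i < n:
--         if tokens[i] == '#':
--             # skip the whole run of '#' markers, hashtag the next real token
--             while i < n and tokens[i] == '#':
--                 i += 1
--             if i < n:
--                 parts.append('#' + tokens[i])
--                 i += 1
--         else:
--             parts.append(tokens[i])
--             i += 1
--     return ' '.join(parts).strip()
-- ===== Notes on version B (the rewrite author's own statement) =====
-- stated objective: alternative
-- what changed: Replaces the carried is_hashtag flag and string concatenation with an index-based while loop that skips each run of '#' markers via lookahead, collects parts into a list and returns ' '.join(parts).strip().
import Mathlib
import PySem

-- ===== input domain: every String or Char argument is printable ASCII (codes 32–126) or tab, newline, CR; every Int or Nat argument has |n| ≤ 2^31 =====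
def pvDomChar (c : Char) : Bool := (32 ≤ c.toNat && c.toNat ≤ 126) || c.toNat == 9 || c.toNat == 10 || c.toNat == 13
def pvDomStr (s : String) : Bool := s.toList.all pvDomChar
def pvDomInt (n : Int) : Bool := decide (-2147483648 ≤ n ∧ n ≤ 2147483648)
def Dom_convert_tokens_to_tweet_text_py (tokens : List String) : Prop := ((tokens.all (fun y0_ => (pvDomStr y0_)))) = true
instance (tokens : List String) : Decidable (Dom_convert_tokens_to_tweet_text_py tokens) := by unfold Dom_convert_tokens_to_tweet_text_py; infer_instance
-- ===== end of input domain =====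

-- B replaces A's carried is_hashtag flag and string concatenation by an index walk that
-- skips each run of '#' markers with lookahead, collects parts and joins them (objective: alternative).

-- ===== PORT A =====
def pvStepA (st : Bool × String) (token : String) : Bool × String :=
  if token == "#" then (true, st.2)
  else if st.1 then (false, st.2 ++ " #" ++ token)
  else (st.1, st.2 ++ " " ++ token)

def convert_tokens_to_tweet_text_py (tokens : List String) : String :=
  PySem.Str.strip (tokens.foldl pvStepA (false, "")).2

-- ===== PORT B =====
-- the inner `while i < n and tokens[i] == '#': i += 1` loop
def pvSkipHashes : List String → List String
  | [] => []
  | t :: rest => if t == "#" then pvSkipHashes rest else t :: rest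

theorem pvSkipHashes_length_le : ∀ l : List String, (pvSkipHashes l).length ≤ l.length
  | [] => Nat.le_refl _
  | t :: rest => by
      unfold pvSkipHashes
      split
      · exact Nat.le_trans (pvSkipHashes_length_le rest) (Nat.le_succ _)
      · exact Nat.le_refl _

-- the outer while loop, collecting `parts`
def pvPartsB : List String → List String
  | [] => []
  | t :: rest =>
    if t == "#" then
      match h : pvSkipHashes rest with
      | [] => []
      | u :: rest' => ("#" ++ u) :: pvPartsB rest'
    else t :: pvPartsB rest
termination_by l => l.length
decreasing_by
  · have hle := pvSkipHashes_length_le rest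
    rw [h] at hle
    simp only [List.length_cons] at hle ⊢
    omega
  · simp

def convert_tokens_to_tweet_text_py_alt (tokens : List String) : String :=
  PySem.Str.strip (PySem.Str.join " " (pvPartsB tokens))

-- ===== PRECONDITION & SPEC =====
def Spec_convert_tokens_to_tweet_text_py (tokens : List String) (out : String) : Prop := out = convert_tokens_to_tweet_text_py_alt tokens
instance (tokens : List String) (out : String) : Decidable (Spec_convert_tokens_to_tweet_text_py tokens out) := by unfold Spec_convert_tokens_to_tweet_text_py; infer_instance

-- ===== CLAIM (what is proved, stated in full; the proofs are below) =====
def Claim_equal_convert_tokens_to_tweet_text_py : Prop := ∀ (tokens : List String), Dom_convert_tokens_to_tweet_text_py tokens → Spec_convert_tokens_to_tweet_text_py tokens (convert_tokens_to_tweet_text_py tokens)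

-- ===== LEMMAS AND PROOFS =====

-- the text A's loop appends for a given list of parts
def pvRender : List String → String
  | [] => ""
  | p :: ps => " " ++ p ++ pvRender ps

-- parts produced when the is_hashtag flag is set
def pvPartsHash (l : List String) : List String :=
  match pvSkipHashes l with
  | [] => []
  | u :: rest' => ("#" ++ u) :: pvPartsB rest'

theorem pvPartsB_cons_hash (rest : List String) : pvPartsB ("#" :: rest) = pvPartsHash rest := by
  rw [pvPartsB, pvPartsHash]
  simp only [beq_self_eq_true, if_true]
  cases hsk : pvSkipHashes rest <;> simp [hsk]

theorem pvPartsB_cons_ne (t : String) (rest : List String) (h : (t == "#") = false) :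
    pvPartsB (t :: rest) = t :: pvPartsB rest := by
  rw [pvPartsB]
  simp [h]

theorem pvPartsHash_cons_hash (rest : List String) : pvPartsHash ("#" :: rest) = pvPartsHash rest := by
  rw [pvPartsHash, pvPartsHash, pvSkipHashes]
  simp

theorem pvPartsHash_cons_ne (t : String) (rest : List String) (h : (t == "#") = false) :
    pvPartsHash (t :: rest) = ("#" ++ t) :: pvPartsB rest := by
  rw [pvPartsHash, pvSkipHashes]
  simp [h]

theorem pvSpaceHash : (" #" : String) = " " ++ "#" := by decide

theorem pvLoopA : ∀ (tokens : List String) (acc : String),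
    ((tokens.foldl pvStepA (false, acc)).2 = acc ++ pvRender (pvPartsB tokens))
    ∧ ((tokens.foldl pvStepA (true, acc)).2 = acc ++ pvRender (pvPartsHash tokens)) := by
  intro tokens
  induction tokens with
  | nil =>
      intro acc
      constructor <;> simp [pvPartsB, pvPartsHash, pvSkipHashes, pvRender]
  | cons t rest ih =>
      intro acc
      by_cases ht : (t == "#") = true
      · have ht' : t = "#" := by simpa using ht
        subst ht'
        constructor
        · simp only [List.foldl_cons, pvStepA, if_pos rfl]
          rw [pvPartsB_cons_hash]
          exact (ih acc).2
        · simp only [List.foldl_cons, pvStepA, if_pos rfl]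
          rw [pvPartsHash_cons_hash]
          exact (ih acc).2
      · have ht' : (t == "#") = false := by simpa using ht
        constructor
        · simp only [List.foldl_cons, pvStepA, ht', if_neg, Bool.false_eq_true, if_false]
          rw [pvPartsB_cons_ne t rest ht', (ih (acc ++ " " ++ t)).1]
          simp [pvRender, String.append_assoc]
        · simp only [List.foldl_cons, pvStepA, ht', Bool.false_eq_true, if_false, if_true]
          rw [pvPartsHash_cons_ne t rest ht', (ih (acc ++ " #" ++ t)).1]
          simp only [pvRender, pvSpaceHash, String.append_assoc]

theorem pvRender_toList : ∀ ps : List String,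
    (pvRender ps).toList =
      (match ps with
        | [] => ([] : List Char)
        | _ :: _ => ' ' :: PySem.Chars.join [' '] (ps.map String.toList)) := by
  intro ps
  induction ps with
  | nil => simp [pvRender]
  | cons p ps ih =>
      cases ps with
      | nil =>
          simp [pvRender, PySem.Chars.join_singleton]
      | cons q r =>
          have ih' : (pvRender (q :: r)).toList =
              ' ' :: PySem.Chars.join [' '] ((q :: r).map String.toList) := by
            simpa using ih
          have hsp : (" " : String).toList = [' '] := by decide
          rw [show pvRender (p :: q :: r) = " " ++ p ++ pvRender (q :: r) from rfl]
          simp only [String.toList_append, ih', hsp, List.map_cons]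
          rw [PySem.Chars.join_cons_cons]
          simp

theorem pvStrip_space (cs : List Char) : PySem.Chars.strip (' ' :: cs) = PySem.Chars.strip cs := by
  simp [PySem.Chars.strip, PySem.Chars.lstrip, PySem.Chars.isspace]

theorem pvStrip_render (ps : List String) :
    PySem.Str.strip (pvRender ps) = PySem.Str.strip (PySem.Str.join " " ps) := by
  apply String.toList_inj.mp
  simp only [PySem.Str.toList_strip, PySem.Str.toList_join]
  cases ps with
  | nil => simp [pvRender]
  | cons p ps =>
      rw [pvRender_toList]
      have : (" " : String).toList = [' '] := by decide
      rw [this, pvStrip_space]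

-- ===== VERDICT (by name: the statement is the Claim_ definition above) =====
theorem convert_tokens_to_tweet_text_py_spec : Claim_equal_convert_tokens_to_tweet_text_py := by
  intro tokens _
  unfold Spec_convert_tokens_to_tweet_text_py
  unfold convert_tokens_to_tweet_text_py convert_tokens_to_tweet_text_py_alt
  rw [(pvLoopA tokens "").1]
  have h0 : ("" : String) ++ pvRender (pvPartsB tokens) = pvRender (pvPartsB tokens) := by simp
  rw [h0, pvStrip_render]
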